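-- pv_equiv track=rewrite | github.com/DavidKinter/postgresql-to-dbdiagram.io-converter | src/quality/loss_reporter.py | _format_warning_categories
-- ===== SOURCE A (Python) =====
-- from typing import Dict, List, Any
--
-- def _format_warning_categories(warnings: List[Dict]) -> str:
--     """Format warning categories for display."""
--
--     if not warnings:
--         return "No warnings generated."
--
--     # Group warnings by type
--     warning_types = {}
--     for warning in warnings:
--         warning_type = warning.get('type', 'UNKNOWN')
--         if warning_type not in warning_types:
--             warning_types[warning_type] = 0
--         warning_types[warning_type] += 1
--
--     formatted = []
--     for warning_type, count in sorted(warning_types.items()):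
--         formatted.append(f"- **{warning_type}:** {count} instances")
--
--     return '\n'.join(formatted)
-- ===== SOURCE B (Python) =====
-- from typing import Dict, List, Any
--
-- def _format_warning_categories(warnings: List[Dict]) -> str:
--     """Format warning categories: sort keys, then count consecutive runs."""
--     if not warnings:
--         return "No warnings generated."
--     keys = sorted(w.get('type', 'UNKNOWN') for w in warnings)
--     return '\n'.join(_runs(keys))
--
-- def _runs(keys):
--     if not keys:
--         return []
--     head = keys[0]
--     i = 1
--     while i < len(keys) and keys[i] == head:
--         i += 1
--     return [f"- **{head}:** {i} instances"] + _runs(keys[i:])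
-- ===== Notes on version B (the rewrite author's own statement) =====
-- stated objective: alternative
-- what changed: Replaces A's dict-based counting pass followed by sorting the (type, count) items with sorting the extracted type keys first and then counting consecutive runs by recursive run-length scanning.
import Mathlib
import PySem

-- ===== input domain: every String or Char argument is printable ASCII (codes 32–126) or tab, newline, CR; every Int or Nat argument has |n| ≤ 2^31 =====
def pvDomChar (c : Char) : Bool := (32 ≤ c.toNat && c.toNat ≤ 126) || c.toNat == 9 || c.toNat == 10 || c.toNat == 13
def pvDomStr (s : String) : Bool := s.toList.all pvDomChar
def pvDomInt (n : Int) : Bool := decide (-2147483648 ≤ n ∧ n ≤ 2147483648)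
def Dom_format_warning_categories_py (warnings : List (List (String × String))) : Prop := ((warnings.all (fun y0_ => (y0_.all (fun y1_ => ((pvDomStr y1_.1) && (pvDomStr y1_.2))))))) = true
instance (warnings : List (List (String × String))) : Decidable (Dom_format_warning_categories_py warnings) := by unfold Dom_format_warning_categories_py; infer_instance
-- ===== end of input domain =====

-- B replaces A's dict-counting pass by sort-then-run-length counting (same output; objective: alternative algorithm).

-- ===== PORT A =====
-- shared by both ports: the f-string "- **{t}:** {c} instances"
def fwcFmt (t : String) (c : Int) : String :=
  "- **" ++ t ++ ":** " ++ PySem.Int.toStr c ++ " instances"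

def format_warning_categories_py (warnings : List (List (String × String))) : String :=
  if warnings = [] then "No warnings generated." else
  let warning_types : PySem.Dict String Int :=
    warnings.foldl (fun d w =>
      let t := (List.lookup "type" w).getD "UNKNOWN"
      let d1 := if d.contains t then d else d.insert t 0
      d1.insert t (d1.getD t 0 + 1)) PySem.Dict.empty
  let formatted : List String :=
    (PySem.List.sorted2 warning_types.items Prod.fst Prod.snd).foldl
      (fun acc p => acc ++ [fwcFmt p.1 p.2]) []
  PySem.Str.join "\n" formatted

-- ===== PORT B =====
-- _runs: one line per run of equal consecutive keys (the keys list is sorted)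
def fwcRuns (keys : List String) : List String :=
  match keys with
  | [] => []
  | head :: rest =>
    fwcFmt head (((rest.takeWhile (fun x => x == head)).length : Int) + 1)
      :: fwcRuns (rest.dropWhile (fun x => x == head))
termination_by keys.length
decreasing_by
  simpa [Nat.lt_succ_iff] using List.Sublist.length_le (List.dropWhile_sublist _)

def format_warning_categories_py_alt (warnings : List (List (String × String))) : String :=
  if warnings = [] then "No warnings generated." else
  let keys := PySem.List.sorted
    (warnings.map (fun w => (List.lookup "type" w).getD "UNKNOWN")) (fun x => x)
  PySem.Str.join "\n" (fwcRuns keys)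

-- ===== PRECONDITION & SPEC =====
def Spec_format_warning_categories_py (warnings : List (List (String × String))) (out : String) : Prop := out = format_warning_categories_py_alt warnings
instance (warnings : List (List (String × String))) (out : String) : Decidable (Spec_format_warning_categories_py warnings out) := by unfold Spec_format_warning_categories_py; infer_instance

-- ===== CLAIM (what is proved, stated in full; the proofs are below) =====
def Claim_equal_format_warning_categories_py : Prop := ∀ (warnings : List (List (String × String))), Dom_format_warning_categories_py warnings → Spec_format_warning_categories_py warnings (format_warning_categories_py warnings)

-- ===== LEMMAS AND PROOFS =====

-- A's dict-building step is the standard counting step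
lemma fwc_step_eq (d : PySem.Dict String Int) (t : String) :
    (let d1 := if d.contains t then d else d.insert t 0
     d1.insert t (d1.getD t 0 + 1)) = d.insert t (d.getD t 0 + 1) := by
  by_cases hc : d.contains t
  · simp [hc]
  · simp only [hc, Bool.false_eq_true, if_false]
    rw [PySem.Dict.getD_insert_self, PySem.Dict.insert_insert_self,
      PySem.Dict.getD_of_not_contains d (0 : Int) (by simpa using hc)]

-- A's whole loop is Counter(keys)
lemma fwc_loop_eq (warnings : List (List (String × String))) :
    warnings.foldl (fun d w =>
      let t := (List.lookup "type" w).getD "UNKNOWN"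
      let d1 := if d.contains t then d else d.insert t 0
      d1.insert t (d1.getD t 0 + 1)) PySem.Dict.empty
    = PySem.Dict.counter (warnings.map (fun w => (List.lookup "type" w).getD "UNKNOWN")) := by
  rw [← PySem.Dict.foldl_insert_getD_add_one_eq_counter, List.foldl_map]
  exact PySem.List.foldl_congr_mem _ _ _ _
    (fun acc w _ => fwc_step_eq acc ((List.lookup "type" w).getD "UNKNOWN"))

-- insertBy only compares the new element with the list's elements
lemma insertBy_congr {α : Type} (b b' : α → α → Bool) (x : α) (ys : List α)
    (h : ∀ y ∈ ys, b x y = b' x y) :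
    PySem.List.insertBy b x ys = PySem.List.insertBy b' x ys := by
  induction ys with
  | nil => rfl
  | cons y ys ih =>
    simp only [PySem.List.insertBy]
    rw [h y (by simp)]
    by_cases hb : b' x y = true
    · simp [hb]
    · simp only [hb]
      have := ih (fun z hz => h z (by simp [hz]))
      rw [this]

lemma foldl_insertBy_congr {α : Type} (b b' : α → α → Bool) (xs acc : List α)
    (h : ∀ a ∈ xs ++ acc, ∀ c ∈ xs ++ acc, b a c = b' a c) :
    xs.foldl (fun acc x => PySem.List.insertBy b x acc) acc
      = xs.foldl (fun acc x => PySem.List.insertBy b' x acc) acc := by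
  induction xs generalizing acc with
  | nil => rfl
  | cons x xs ih =>
    simp only [List.foldl_cons]
    rw [insertBy_congr b b' x acc (fun y hy => h x (by simp) y (by simp [hy]))]
    exact ih _ (by
      intro a ha c hc
      have hsub : ∀ z, z ∈ xs ++ PySem.List.insertBy b' x acc → z ∈ (x :: xs) ++ acc := by
        intro z hz
        rcases List.mem_append.1 hz with hz | hz
        · exact List.mem_append.2 (Or.inl (List.mem_cons_of_mem _ hz))
        · rcases (PySem.List.mem_insertBy _ _ _ _).1 hz with rfl | hz
          · exact List.mem_append.2 (Or.inl (List.mem_cons_self))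
          · exact List.mem_append.2 (Or.inr hz)
      exact h a (hsub a ha) c (hsub c hc))

-- sorted2 on pairs whose equal first keys force equal second keys is sorting by the first key
lemma sorted2_eq_sorted_fst (xs : List (String × Int))
    (hne : ∀ a ∈ xs, ∀ c ∈ xs, a.1 = c.1 → a.2 = c.2) :
    PySem.List.sorted2 xs Prod.fst Prod.snd = PySem.List.sorted xs Prod.fst := by
  rw [PySem.List.sorted_eq_foldl_insertBy]
  simp only [PySem.List.sorted2]
  apply foldl_insertBy_congr
  intro a ha c hc
  simp only [List.append_nil] at ha hc
  rcases lt_trichotomy a.1 c.1 with h1 | h1 | h1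
  · simp [h1, not_lt_of_gt h1]
  · have h2 := hne a ha c hc h1
    simp [h1, h2]
  · simp [not_lt_of_gt h1, h1]

-- set(l) with x removed is the set of l with x filtered out
lemma discard_ofList (l : List String) (x : String) :
    (PySem.Set.ofList l).discard x = PySem.Set.ofList (l.filter (fun y => !(y == x))) := by
  induction l with
  | nil => rfl
  | cons y l ih =>
    rw [PySem.Set.ofList_cons]
    by_cases hyx : y = x
    · subst hyx
      have hf : (y :: l).filter (fun z => !(z == y)) = l.filter (fun z => !(z == y)) := by
        simp
      rw [hf, ← ih]
      simp [PySem.Set.discard, List.filter_filter]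
    · have hf : (y :: l).filter (fun z => !(z == x)) = y :: l.filter (fun z => !(z == x)) := by
        simp [hyx]
      rw [hf, PySem.Set.ofList_cons, ← ih]
      simp only [PySem.Set.discard, List.filter_filter, List.filter_cons]
      rw [if_pos (by simp [hyx])]
      congr 1
      exact List.filter_congr (fun z _ => by simp [Bool.and_comm])

-- the distinct elements of l form a sublist of l
lemma ofList_sublist (l : List String) : (PySem.Set.ofList l).Sublist l := by
  induction l with
  | nil => simp [PySem.Set.ofList, PySem.Set.empty]
  | cons y l ih =>
    rw [PySem.Set.ofList_cons]
    simp only [PySem.Set.discard]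
    exact List.Sublist.cons₂ y (List.filter_sublist.trans ih)

-- k never survives its own dropWhile run when everything in l is ≥ k
lemma not_mem_dropWhile_beq (k : String) (l : List String)
    (hl : l.Pairwise (· ≤ ·)) (hk : ∀ y ∈ l, k ≤ y) :
    k ∉ l.dropWhile (fun x => x == k) := by
  induction l with
  | nil => simp
  | cons y t ih =>
    by_cases hy : (y == k) = true
    · rw [List.dropWhile_cons, if_pos hy]
      exact ih hl.tail (fun z hz => hk z (List.mem_cons_of_mem _ hz))
    · rw [List.dropWhile_cons, if_neg hy]
      intro hmem
      rcases List.mem_cons.1 hmem with h | h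
      · simp [h] at hy
      · have h1 : y ≤ k := List.rel_of_pairwise_cons hl h
        have h2 : k ≤ y := hk y (List.mem_cons_self)
        simp [le_antisymm h1 h2] at hy

-- run-length counting of a sorted list: one line per distinct key with its total count
lemma fwcRuns_sorted (s : List String) (hs : s.Pairwise (· ≤ ·)) :
    fwcRuns s = (PySem.Set.ofList s).map (fun k => fwcFmt k ((s.count k : Nat) : Int)) := by
  induction s using fwcRuns.induct with
  | case1 => rw [fwcRuns]; rfl
  | case2 head rest ih =>
    have hrest : rest.Pairwise (· ≤ ·) := hs.tail
    have hhead : ∀ y ∈ rest, head ≤ y := fun y hy => List.rel_of_pairwise_cons hs hy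
    set run := rest.takeWhile (fun x => x == head) with hrundef
    set rest' := rest.dropWhile (fun x => x == head) with hrest'def
    have hsplit : run ++ rest' = rest := List.takeWhile_append_dropWhile
    have hrunk : ∀ y ∈ run, y = head := by
      intro y hy
      have := List.mem_takeWhile_imp hy
      simpa using this
    have hrest'pw : rest'.Pairwise (· ≤ ·) := hrest.sublist (List.dropWhile_sublist _)
    have hknotin : head ∉ rest' := not_mem_dropWhile_beq head rest hrest hhead
    have hcntrest : rest.count head = run.length := by
      rw [← hsplit, List.count_append, List.count_eq_zero.2 hknotin,
        List.count_eq_length.2 (fun b hb => (hrunk b hb).symm), Nat.add_zero]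
    have hcnt_tail : ∀ k ∈ rest', (head :: rest).count k = rest'.count k := by
      intro k hk
      have hkne : k ≠ head := fun h => hknotin (h ▸ hk)
      rw [← hsplit]
      simp [List.count_append,
        List.count_eq_zero.2 (fun hmem => hkne (hrunk k hmem)), Ne.symm hkne]
    have hset : PySem.Set.ofList (head :: rest) = head :: PySem.Set.ofList rest' := by
      rw [PySem.Set.ofList_cons, discard_ofList]
      congr 1
      have hfil : rest.filter (fun y => !(y == head)) = rest' := by
        rw [← hsplit, List.filter_append]
        have h1 : run.filter (fun y => !(y == head)) = [] := by
          apply List.filter_eq_nil_iff.2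
          intro a ha; simp [hrunk a ha]
        have h2 : rest'.filter (fun y => !(y == head)) = rest' := by
          apply List.filter_eq_self.2
          intro a ha
          simp only [Bool.not_eq_eq_eq_not, Bool.not_true, beq_eq_false_iff_ne, ne_eq]
          rintro rfl; exact hknotin ha
        rw [h1, h2, List.nil_append]
      rw [hfil]
    rw [fwcRuns, hset, List.map_cons, ih hrest'pw]
    congr 1
    · rw [List.count_cons_self, hcntrest]
      congr 1
    · exact List.map_congr_left (fun k hk =>
        congrArg (fun n : Nat => fwcFmt k (n : Int)) (hcnt_tail k ((PySem.Set.mem_ofList _ _).1 hk)).symm)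

-- the two formatted line lists coincide
lemma fwc_lines_eq (ks : List String) :
    (PySem.List.sorted2 (PySem.Dict.counter ks).items Prod.fst Prod.snd).map
        (fun p => fwcFmt p.1 p.2)
      = fwcRuns (PySem.List.sorted ks (fun x => x)) := by
  have hitems := PySem.Dict.items_counter ks
  -- A side: sorted2 is sort-by-first-key here
  have hs2 : PySem.List.sorted2 (PySem.Dict.counter ks).items Prod.fst Prod.snd
      = PySem.List.sorted (PySem.Dict.counter ks).items Prod.fst := by
    apply sorted2_eq_sorted_fst
    intro a ha c hc h1
    rw [hitems] at ha hc
    obtain ⟨ka, -, rfl⟩ := List.mem_map.1 ha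
    obtain ⟨kc, -, rfl⟩ := List.mem_map.1 hc
    simp only at h1 ⊢
    rw [h1]
  -- A side: sorting the counter's items is mapping over the sorted distinct keys
  have hsortA : PySem.List.sorted (PySem.Dict.counter ks).items Prod.fst
      = (PySem.List.sorted (PySem.Set.ofList ks) (fun x => x)).map
          (fun k => (k, ((ks.count k : Nat) : Int))) := by
    apply PySem.List.sorted_eq_of_perm_of_pairwise_lt
    · rw [hitems]
      exact (PySem.List.sorted_perm (PySem.Set.ofList ks) (fun x => x) false).map _
    · exact (PySem.List.sorted_ofList_pairwise_lt ks).map _ (fun a b h => h)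
  -- B side: the distinct elements of the sorted keys are the sorted distinct keys
  have hsetB : PySem.List.sorted (PySem.Set.ofList ks) (fun x => x)
      = PySem.Set.ofList (PySem.List.sorted ks (fun x => x)) := by
    apply PySem.List.sorted_eq_of_perm_of_pairwise_lt
    · exact (List.perm_ext_iff_of_nodup (PySem.Set.nodup_ofList _) (PySem.Set.nodup_ofList _)).2
        (fun a => by
          rw [PySem.Set.mem_ofList, PySem.Set.mem_ofList, PySem.List.mem_sorted])
    · have hle : (PySem.Set.ofList (PySem.List.sorted ks (fun x => x))).Pairwise (· ≤ ·) :=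
        (PySem.List.sorted_pairwise ks (fun x => x)).sublist (ofList_sublist _)
      have hnd : (PySem.Set.ofList (PySem.List.sorted ks (fun x => x))).Nodup :=
        PySem.Set.nodup_ofList _
      exact (hle.and hnd).imp (fun h => lt_of_le_of_ne h.1 h.2)
  rw [hs2, hsortA, List.map_map,
    fwcRuns_sorted _ (PySem.List.sorted_pairwise ks (fun x => x)), ← hsetB]
  exact List.map_congr_left (fun k _ => by
    simp only [Function.comp]
    congr 2
    exact ((PySem.List.sorted_perm ks (fun x => x) false).count_eq k).symm)

-- ===== VERDICT (by name: the statement is the Claim_ definition above) =====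
theorem format_warning_categories_py_spec : Claim_equal_format_warning_categories_py := by
  intro warnings _
  unfold Spec_format_warning_categories_py
  unfold format_warning_categories_py format_warning_categories_py_alt
  by_cases hw : warnings = []
  · simp [hw]
  · simp only [hw, if_false]
    rw [fwc_loop_eq, PySem.List.foldl_append_singleton_eq_map, List.nil_append, fwc_lines_eq]
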